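-- pv_equiv track=rewrite | github.com/vinit-agr/rag-evaluation-system | src/rag_evaluation_system/chunkers/recursive_character.py | _split_by_separator
-- ===== SOURCE A (Python) =====
-- def _split_by_separator(text: str, separator: str) -> list[str]:
--     """Split text by a separator, keeping non-empty results.
--
--     Args:
--         text: The text to split.
--         separator: The separator to split on.
--
--     Returns:
--         List of non-empty splits. If separator is empty, splits into characters.
--     """
--     if separator == "":
--         # Character-level split
--         return list(text)
--
--     parts = text.split(separator)
--     # Re-attach separator to the end of each part except the last
--     result: list[str] = []
--     for i, part in enumerate(parts):
--         if i < len(parts) - 1: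
--             # Add separator back to non-final parts
--             result.append(part + separator)
--         elif part:  # Only add final part if non-empty
--             result.append(part)
--
--     return result
-- ===== SOURCE B (Python) =====
-- def _split_by_separator(text: str, separator: str) -> list[str]:
--     """Split text by a separator, keeping non-empty results.
--
--     Manual scan: find each separator occurrence and emit the chunk up to and
--     including it; the trailing remainder is emitted only if non-empty.
--     """
--     if separator == "":
--         return list(text)
--     result: list[str] = []
--     start = 0
--     step = len(separator)
--     while True:
--         idx = text.find(separator, start)
--         if idx == -1:
--             tail = text[start:]
--             if tail:
--                 result.append(tail)
--             return result
--         result.append(text[start:idx] + separator)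
--         start = idx + step
-- ===== Notes on version B (the rewrite author's own statement) =====
-- stated objective: alternative
-- what changed: Replaces split-into-parts plus an enumerate loop that reattaches the separator (with an index comparison to spot the last part) by a single manual scan with str.find that emits each chunk together with its separator directly, appending the trailing remainder only if non-empty.
import Mathlib
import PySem

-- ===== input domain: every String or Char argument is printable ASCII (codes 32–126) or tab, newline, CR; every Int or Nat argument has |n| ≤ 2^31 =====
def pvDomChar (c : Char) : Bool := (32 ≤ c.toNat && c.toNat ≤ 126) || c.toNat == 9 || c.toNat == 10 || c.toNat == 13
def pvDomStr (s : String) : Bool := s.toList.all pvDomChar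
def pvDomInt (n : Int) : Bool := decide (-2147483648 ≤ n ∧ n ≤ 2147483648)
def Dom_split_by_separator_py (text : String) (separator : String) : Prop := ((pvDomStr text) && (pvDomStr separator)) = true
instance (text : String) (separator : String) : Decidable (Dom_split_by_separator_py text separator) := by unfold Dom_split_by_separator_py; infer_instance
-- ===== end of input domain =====

-- B replaces split+enumerate-reattach by a single manual scan over find positions (alternative decomposition, same cost).

-- ===== PORT A =====
-- the 'for i, part in enumerate(parts)' loop of A, with n = len(parts) and i the running index
def pvReattach (sep : List Char) (n : Nat) : Nat → List (List Char) → List (List Char) → List (List Char)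
  | _, [], res => res
  | i, p :: ps, res =>
    if i < n - 1 then pvReattach sep n (i + 1) ps (res ++ [p ++ sep])
    else if p ≠ [] then res ++ [p] else res

def split_by_separator_py (text : String) (separator : String) : List String :=
  if separator = "" then
    text.toList.map (fun c => String.ofList [c])
  else
    let parts := PySem.Chars.splitOn text.toList separator.toList
    (pvReattach separator.toList parts.length 0 parts []).map String.ofList

-- ===== PORT B =====
-- Source B's while-loop: 'start' is represented by the already-consumed prefix (we recurse on the suffix)
def pvScan (sep : List Char) (hsep : sep ≠ []) (s : List Char) : List (List Char) :=
  let idx := PySem.Chars.find s sep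
  if h : idx = -1 then (if s = [] then [] else [s])
  else (s.take idx.toNat ++ sep) :: pvScan sep hsep (s.drop (idx.toNat + sep.length))
termination_by s.length
decreasing_by
  have hs : s ≠ [] := by
    intro he
    subst he
    exact h (show PySem.Chars.find ([] : List Char) sep = -1 by
      simp [PySem.Chars.find, PySem.Chars.find.go, hsep])
  have h1 : 1 ≤ sep.length := Nat.one_le_iff_ne_zero.mpr (by simpa using hsep)
  have h2 : 0 < s.length := List.length_pos_iff.mpr hs
  simp only [List.length_drop]
  omega

def split_by_separator_py_alt (text : String) (separator : String) : List String :=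
  if h : separator = "" then
    text.toList.map (fun c => String.ofList [c])
  else
    (pvScan separator.toList
      (by intro hl; exact h (by rw [← @String.ofList_toList separator, hl]))
      text.toList).map String.ofList

-- ===== PRECONDITION & SPEC =====
def Spec_split_by_separator_py (text : String) (separator : String) (out : List String) : Prop := out = split_by_separator_py_alt text separator
instance (text : String) (separator : String) (out : List String) : Decidable (Spec_split_by_separator_py text separator out) := by unfold Spec_split_by_separator_py; infer_instance

-- ===== CLAIM (what is proved, stated in full; the proofs are below) =====
def Claim_equal_split_by_separator_py : Prop := ∀ (text : String) (separator : String), Dom_split_by_separator_py text separator → Spec_split_by_separator_py text separator (split_by_separator_py text separator)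

-- ===== LEMMAS AND PROOFS =====

-- the clean structural recursion computed by PySem.Chars.splitOn (sep ≠ [] for termination)
def pvSplitList (sep : List Char) (hsep : sep ≠ []) : List Char → List (List Char)
  | [] => [[]]
  | c :: rest =>
    if sep.isPrefixOf (c :: rest) then
      [] :: pvSplitList sep hsep ((c :: rest).drop sep.length)
    else
      (pvSplitList sep hsep rest).modifyHead (c :: ·)
termination_by l => l.length
decreasing_by
  · have h1 : 1 ≤ sep.length := Nat.one_le_iff_ne_zero.mpr (by simpa using hsep)
    simp only [List.length_drop, List.length_cons]
    omega
  · simp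

-- the clean structural recursion computed by A's reattach loop
def pvReattachPure (sep : List Char) : List (List Char) → List (List Char)
  | [] => []
  | [p] => if p = [] then [] else [p]
  | p :: q :: ps => (p ++ sep) :: pvReattachPure sep (q :: ps)

theorem pvFindGo_ge (sep : List Char) : ∀ (t : List Char) (k : Nat),
    PySem.Chars.find.go sep t k = -1 ∨ (k : Int) ≤ PySem.Chars.find.go sep t k := by
  intro t
  induction t with
  | nil =>
    intro k
    by_cases hs : sep.isEmpty
    · right; simp [PySem.Chars.find.go, hs]
    · left; simp [PySem.Chars.find.go, hs]
  | cons c t ih =>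
    intro k
    by_cases hp : sep.isPrefixOf (c :: t)
    · right; simp [PySem.Chars.find.go, hp]
    · rcases ih (k + 1) with h | h
      · left; simpa [PySem.Chars.find.go, hp] using h
      · right
        rw [PySem.Chars.find.go, if_neg hp]
        calc (k : Int) ≤ ((k + 1 : Nat) : Int) := by push_cast; omega
          _ ≤ _ := h

theorem pvFind_ge (sep s : List Char) :
    PySem.Chars.find s sep = -1 ∨ 0 ≤ PySem.Chars.find s sep := by
  have := pvFindGo_ge sep s 0
  simpa [PySem.Chars.find] using this

theorem pvFindGo_eq (sep : List Char) : ∀ (t : List Char) (k : Nat),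
    PySem.Chars.find.go sep t k =
      if PySem.Chars.find t sep = -1 then -1 else PySem.Chars.find t sep + k := by
  intro t
  induction t with
  | nil =>
    intro k
    by_cases hs : sep.isEmpty <;>
      simp [PySem.Chars.find, PySem.Chars.find.go, hs]
  | cons c t ih =>
    intro k
    by_cases hp : sep.isPrefixOf (c :: t)
    · simp [PySem.Chars.find, PySem.Chars.find.go, hp]
    · have hk := ih (k + 1)
      have h0 := ih 1
      have hge := pvFind_ge sep t
      simp only [PySem.Chars.find] at hk h0 hge ⊢
      rw [PySem.Chars.find.go, if_neg hp, hk]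
      conv_rhs => rw [PySem.Chars.find.go]
      rw [if_neg hp, h0]
      rcases hge with h | h
      · simp [h]
      · have hne : PySem.Chars.find.go sep t 0 ≠ -1 := by omega
        simp only [if_neg hne]
        rw [if_neg (show ¬ PySem.Chars.find.go sep t 0 + ((1 : Nat) : Int) = -1 by push_cast; omega)]
        push_cast
        omega

theorem pvFind_cons (sep : List Char) (c : Char) (t : List Char) :
    PySem.Chars.find (c :: t) sep =
      if sep.isPrefixOf (c :: t) then 0
      else if PySem.Chars.find t sep = -1 then -1 else PySem.Chars.find t sep + 1 := by
  by_cases hp : sep.isPrefixOf (c :: t)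
  · simp [PySem.Chars.find, PySem.Chars.find.go, hp]
  · have := pvFindGo_eq sep t 1
    rw [show PySem.Chars.find (c :: t) sep = PySem.Chars.find.go sep (c :: t) 0 from rfl,
        PySem.Chars.find.go, if_neg hp, this, if_neg hp]
    norm_num

theorem pvFind_nil (sep : List Char) (hsep : sep ≠ []) :
    PySem.Chars.find ([] : List Char) sep = -1 := by
  simp [PySem.Chars.find, PySem.Chars.find.go, hsep]

theorem pvModifyHead_idfun {α : Type} (L : List α) : L.modifyHead (fun x => x) = L := by
  cases L <;> rfl

theorem pvSplitOnGo_eq (sep : List Char) (hsep : sep ≠ []) :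
    ∀ (fuel : Nat) (l cur : List Char) (accs : List (List Char)), l.length < fuel →
    PySem.Chars.splitOn.go sep fuel l cur accs =
      accs.reverse ++ (pvSplitList sep hsep l).modifyHead (cur.reverse ++ ·) := by
  intro fuel
  induction fuel with
  | zero => intro l cur accs h; omega
  | succ fuel ih =>
    intro l cur accs h
    match l with
    | [] =>
      simp [PySem.Chars.splitOn.go, pvSplitList]
    | c :: rest =>
      by_cases hp : sep.isPrefixOf (c :: rest)
      · have h1 : 1 ≤ sep.length := Nat.one_le_iff_ne_zero.mpr (by simpa using hsep)
        have hlen : ((c :: rest).drop sep.length).length < fuel := by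
          simp only [List.length_drop, List.length_cons] at *
          omega
        rw [show PySem.Chars.splitOn.go sep (fuel + 1) (c :: rest) cur accs
              = PySem.Chars.splitOn.go sep fuel ((c :: rest).drop sep.length) []
                  (cur.reverse :: accs) from by
            conv_lhs => rw [PySem.Chars.splitOn.go]
            simp [hp]]
        rw [ih _ [] _ hlen]
        rw [show pvSplitList sep hsep (c :: rest)
              = [] :: pvSplitList sep hsep ((c :: rest).drop sep.length) from by
            rw [pvSplitList]; simp [hp]]
        simp [pvModifyHead_idfun]
      · have hlen : rest.length < fuel := by
          simp only [List.length_cons] at h; omega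
        rw [show PySem.Chars.splitOn.go sep (fuel + 1) (c :: rest) cur accs
              = PySem.Chars.splitOn.go sep fuel rest (c :: cur) accs from by
            conv_lhs => rw [PySem.Chars.splitOn.go]
            simp [hp]]
        rw [ih _ (c :: cur) _ hlen]
        rw [show pvSplitList sep hsep (c :: rest)
              = (pvSplitList sep hsep rest).modifyHead (c :: ·) from by
            rw [pvSplitList]; simp [hp]]
        congr 1
        cases pvSplitList sep hsep rest with
        | nil => simp
        | cons p ps => simp

theorem pvSplitOn_eq (sep : List Char) (hsep : sep ≠ []) (s : List Char) :
    PySem.Chars.splitOn s sep = pvSplitList sep hsep s := by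
  have := pvSplitOnGo_eq sep hsep (s.length + 1) s [] [] (by omega)
  simp only [PySem.Chars.splitOn] at *
  rw [this]
  cases pvSplitList sep hsep s with
  | nil => simp
  | cons p ps => simp

theorem pvSplitList_ne_nil (sep : List Char) (hsep : sep ≠ []) (s : List Char) :
    pvSplitList sep hsep s ≠ [] := by
  match s with
  | [] => simp [pvSplitList]
  | c :: rest =>
    rw [pvSplitList]
    split
    · simp
    · have := pvSplitList_ne_nil sep hsep rest
      revert this
      cases pvSplitList sep hsep rest <;> simp

theorem pvFind_zero_of_prefix (sep : List Char) (c : Char) (t : List Char)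
    (hp : sep.isPrefixOf (c :: t)) : PySem.Chars.find (c :: t) sep = 0 := by
  rw [pvFind_cons]; simp [hp]

theorem pvSplitList_neg (sep : List Char) (hsep : sep ≠ []) :
    ∀ s : List Char, PySem.Chars.find s sep = -1 → pvSplitList sep hsep s = [s] := by
  intro s
  induction s with
  | nil => intro _; simp [pvSplitList]
  | cons c t ih =>
    intro hf
    rw [pvFind_cons] at hf
    by_cases hp : sep.isPrefixOf (c :: t)
    · simp [hp] at hf
    · rw [if_neg hp] at hf
      have hft : PySem.Chars.find t sep = -1 := by
        rcases pvFind_ge sep t with h | h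
        · exact h
        · exfalso
          rw [if_neg (show PySem.Chars.find t sep ≠ -1 by omega)] at hf
          omega
      rw [pvSplitList, if_neg hp, ih hft]
      rfl

theorem pvSplitList_pos (sep : List Char) (hsep : sep ≠ []) :
    ∀ (s : List Char) (k : Nat), PySem.Chars.find s sep = (k : Int) →
    pvSplitList sep hsep s = s.take k :: pvSplitList sep hsep (s.drop (k + sep.length)) := by
  intro s
  induction s with
  | nil =>
    intro k hf
    rw [pvFind_nil sep hsep] at hf
    omega
  | cons c t ih =>
    intro k hf
    by_cases hp : sep.isPrefixOf (c :: t)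
    · have h0 : k = 0 := by
        have := pvFind_zero_of_prefix sep c t hp
        rw [this] at hf; omega
      subst h0
      rw [pvSplitList]
      simp [hp]
    · rw [pvFind_cons, if_neg hp] at hf
      have hft : ∃ k' : Nat, PySem.Chars.find t sep = (k' : Int) ∧ k = k' + 1 := by
        rcases pvFind_ge sep t with h | h
        · rw [if_pos h] at hf
          exfalso; omega
        · rw [if_neg (show PySem.Chars.find t sep ≠ -1 by omega)] at hf
          exact ⟨(PySem.Chars.find t sep).toNat, by omega, by omega⟩
      rcases hft with ⟨k', hk', hkk⟩
      subst hkk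
      rw [pvSplitList, if_neg hp, ih k' hk']
      have harr : k' + 1 + sep.length = (k' + sep.length) + 1 := by omega
      rw [harr]
      simp [List.take_succ_cons, List.drop_succ_cons]

theorem pvReattachPure_cons (sep : List Char) (p : List Char) (ps : List (List Char))
    (h : ps ≠ []) : pvReattachPure sep (p :: ps) = (p ++ sep) :: pvReattachPure sep ps := by
  cases ps with
  | nil => simp at h
  | cons q ps' => rw [pvReattachPure]

theorem pvReattach_eq (sep : List Char) (n : Nat) :
    ∀ (ps : List (List Char)) (i : Nat) (res : List (List Char)), i + ps.length = n →
    pvReattach sep n i ps res = res ++ pvReattachPure sep ps := by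
  intro ps
  induction ps with
  | nil => intro i res _; simp [pvReattach, pvReattachPure]
  | cons p ps ih =>
    intro i res hn
    rw [pvReattach]
    cases ps with
    | nil =>
      simp only [List.length_cons, List.length_nil] at hn
      have : ¬ i < n - 1 := by omega
      rw [if_neg this]
      by_cases hp : p = []
      · simp [hp, pvReattachPure]
      · simp [hp, pvReattachPure]
    | cons q ps' =>
      have hlt : i < n - 1 := by
        simp only [List.length_cons] at hn; omega
      rw [if_pos hlt]
      rw [ih (i + 1) (res ++ [p ++ sep]) (by simp at hn ⊢; omega)]
      rw [pvReattachPure_cons sep p (q :: ps') (by simp)]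
      simp

theorem pvBridge (sep : List Char) (hsep : sep ≠ []) :
    ∀ (n : Nat) (s : List Char), s.length ≤ n →
    pvReattachPure sep (pvSplitList sep hsep s) = pvScan sep hsep s := by
  intro n
  induction n with
  | zero =>
    intro s hs
    have h0 : s = [] := by
      cases s with
      | nil => rfl
      | cons c t => simp at hs
    subst h0
    rw [show pvScan sep hsep [] = [] from by
      rw [pvScan]; simp [pvFind_nil sep hsep]]
    simp [pvSplitList, pvReattachPure]
  | succ n ih =>
    intro s hs
    rcases pvFind_ge sep s with hneg | hpos
    · rw [pvSplitList_neg sep hsep s hneg]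
      rw [pvScan]
      simp only [hneg, dif_pos]
      by_cases h0 : s = []
      · simp [h0, pvReattachPure]
      · simp [h0, pvReattachPure]
    · have hsne : s ≠ [] := by
        intro h0
        rw [h0, pvFind_nil sep hsep] at hpos
        omega
      have h1 : 1 ≤ sep.length := Nat.one_le_iff_ne_zero.mpr (by simpa using hsep)
      have h2 : 0 < s.length := List.length_pos_iff.mpr hsne
      have hlen : (s.drop ((PySem.Chars.find s sep).toNat + sep.length)).length ≤ n := by
        simp only [List.length_drop]
        omega
      rw [pvSplitList_pos sep hsep s (PySem.Chars.find s sep).toNat (by omega)]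
      rw [pvReattachPure_cons sep _ _ (pvSplitList_ne_nil sep hsep _)]
      rw [ih _ hlen]
      conv_rhs => rw [pvScan]
      rw [dif_neg (show ¬ PySem.Chars.find s sep = -1 by omega)]

-- ===== VERDICT (by name: the statement is the Claim_ definition above) =====
theorem split_by_separator_py_spec : Claim_equal_split_by_separator_py := by
  unfold Claim_equal_split_by_separator_py
  intro text separator _
  unfold Spec_split_by_separator_py
  unfold split_by_separator_py split_by_separator_py_alt
  by_cases h : separator = ""
  · simp [h]
  · rw [dif_neg h, if_neg h]
    have hsep : separator.toList ≠ [] :=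
      fun hl => h (by rw [← @String.ofList_toList separator, hl])
    show List.map String.ofList
        (pvReattach separator.toList (PySem.Chars.splitOn text.toList separator.toList).length 0
          (PySem.Chars.splitOn text.toList separator.toList) []) = _
    congr 1
    rw [pvSplitOn_eq separator.toList hsep,
        pvReattach_eq separator.toList _ _ 0 [] (by simp)]
    simp only [List.nil_append]
    exact pvBridge separator.toList hsep text.toList.length text.toList (le_refl _)
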